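-- pv_equiv track=rewrite | github.com/qeedquan/challenges | codegolf/blinking-lighthouses.py | calculate
-- ===== SOURCE A (Python) =====
-- def calculate(lighthouses):
--     lighthouses = [x.replace('S', '10') for x in lighthouses]
--     lighthouses = [x.replace('L', '1110') for x in lighthouses]
--
--     lighthouses = [x + '0'*6 for x in lighthouses]
--     lighthouses = [x * 450 for x in lighthouses]
--
--     total = [0] * (len(lighthouses) + 1)
--     for i in range(3600):
--         total[[c[i] for c in lighthouses].count('1')] += 1
--     return total
-- ===== SOURCE B (Python) =====
-- def calculate(lighthouses):
--     # Periodicity: each expanded base pattern repeats with period L = len(base), so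
--     # instead of materializing 3600-step strings and scanning every time step, stride
--     # through time in steps of L from each lit offset of the short base pattern.
--     counts = [0] * 3600
--     for x in lighthouses:
--         base = x.replace('S', '10').replace('L', '1110') + '0' * 6
--         L = len(base)
--         for r in range(L):
--             if base[r] == '1':
--                 i = r
--                 while i < 3600:
--                     counts[i] += 1
--                     i += L
--     total = [0] * (len(lighthouses) + 1)
--     for k in counts:
--         total[k] += 1
--     return total
-- ===== Notes on version B (the rewrite author's own statement) =====
-- stated objective: faster
-- what changed: B exploits the periodicity of each pattern: instead of materializing every pattern as a 450-fold repeated string and rebuilding/counting a fresh column list at each of the 3600 time steps, it strides through the time axis in steps of the short base pattern's length from each lit offset, then tallies the counts table into the histogram.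
import Mathlib
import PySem

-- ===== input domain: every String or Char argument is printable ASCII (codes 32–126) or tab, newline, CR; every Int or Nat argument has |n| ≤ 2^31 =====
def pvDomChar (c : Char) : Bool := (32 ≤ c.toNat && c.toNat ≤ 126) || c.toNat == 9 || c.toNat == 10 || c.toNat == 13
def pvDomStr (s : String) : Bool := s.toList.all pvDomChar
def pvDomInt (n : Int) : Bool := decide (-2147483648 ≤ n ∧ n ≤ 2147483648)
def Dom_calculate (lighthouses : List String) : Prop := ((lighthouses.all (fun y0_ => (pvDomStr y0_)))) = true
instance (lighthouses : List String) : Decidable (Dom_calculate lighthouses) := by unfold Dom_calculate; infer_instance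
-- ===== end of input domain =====

-- B exploits periodicity: it strides through time from each lit offset of the short base
-- pattern instead of materializing and scanning 3600-step repeated strings (measured faster).


-- ===== PORT A =====
-- transliteration of A: four list comprehensions expanding the patterns (string work done
-- on char lists, which is exact), then one loop over range(3600) counting the '1'-column
-- and bumping the histogram slot; c[i] is PySem.List.pyGet? (none exactly where Python raises).
def calculate (lighthouses : List String) : List Int :=
  let l1 := lighthouses.map (fun x => PySem.Str.replace x "S" "10")
  let l2 := l1.map (fun x => PySem.Str.replace x "L" "1110")
  let l3 := l2.map (fun x => x.toList ++ ['0', '0', '0', '0', '0', '0'])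
  let l4 := l3.map (fun x => PySem.List.pyRepeat x 450)
  let total := List.replicate (l4.length + 1) (0 : Int)
  (List.range 3600).foldl
    (fun (t : List Int) (i : Nat) =>
      let k := PySem.List.count (l4.map (fun c => PySem.List.pyGet? c (i : Int))) (some '1')
      t.set k (t.getD k 0 + 1))
    total

-- ===== PORT B =====
-- transliteration of Source B; counts holds nonnegative tallies, kept as Nat.
-- base = x.replace('S','10').replace('L','1110') + '0'*6, as a char list
def pvBase (x : String) : List Char :=
  (PySem.Str.replace (PySem.Str.replace x "S" "10") "L" "1110").toList
    ++ ['0', '0', '0', '0', '0', '0']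

-- the inner 'i = r; while i < 3600: counts[i] += 1; i += L' loop (fuel 3600 suffices: L ≥ 1)
def pvStride : Nat → List Nat → Nat → Nat → List Nat
  | 0, cs, _, _ => cs
  | f + 1, cs, i, L => if i < 3600 then pvStride f (cs.set i (cs.getD i 0 + 1)) (i + L) L else cs

-- one lighthouse: for r in range(L): if base[r] == '1': stride from r
def pvMark (cs : List Nat) (x : String) : List Nat :=
  let base := pvBase x
  let L := base.length
  (List.range L).foldl
    (fun cs r => if base.getD r ' ' = '1' then pvStride 3600 cs r L else cs) cs

def calculate_alt (lighthouses : List String) : List Int :=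
  let counts := lighthouses.foldl pvMark (List.replicate 3600 0)
  let total := List.replicate (lighthouses.length + 1) (0 : Int)
  counts.foldl (fun t k => t.set k (t.getD k 0 + 1)) total

-- ===== PRECONDITION & SPEC =====
-- Pre_ excludes inputs where Python A raises IndexError: a lighthouse string whose expanded
-- pattern is shorter than 2 symbols ('' or a single char other than 'S'/'L') repeats to fewer
-- than 3600 characters, so c[i] goes out of range.  (B's modular striding
-- returns the periodic histogram there instead of raising.)
def Pre_calculate (lighthouses : List String) : Prop :=
  ∀ s ∈ lighthouses, 2 ≤ s.toList.length ∨ s.toList = ['S'] ∨ s.toList = ['L']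
instance (lighthouses : List String) : Decidable (Pre_calculate lighthouses) := by
  unfold Pre_calculate; infer_instance
def pvWitness_calculate : List String := (["SL", "LS0"])

def Spec_calculate (lighthouses : List String) (out : List Int) : Prop := out = calculate_alt lighthouses
instance (lighthouses : List String) (out : List Int) : Decidable (Spec_calculate lighthouses out) := by unfold Spec_calculate; infer_instance

-- ===== CLAIM (what is proved, stated in full; the proofs are below) =====
def Claim_equal_calculate : Prop := ∀ (lighthouses : List String), Dom_calculate lighthouses → Pre_calculate lighthouses → Spec_calculate lighthouses (calculate lighthouses)

-- ===== LEMMAS AND PROOFS =====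

-- per-character expansion: 'S' -> "10", 'L' -> "1110" (applied sequentially, as in A and B)
def pvCharExp (d : Char) : List Char :=
  if d = 'S' then ['1', '0'] else if d = 'L' then ['1', '1', '1', '0'] else [d]

lemma pv_replace_go_single (c : Char) (new : List Char) :
    ∀ (fuel : Nat) (l acc : List Char), l.length ≤ fuel →
    PySem.Chars.replace.go [c] new fuel l acc
      = acc.reverse ++ l.flatMap (fun d => if d = c then new else [d]) := by
  intro fuel
  induction fuel with
  | zero =>
    intro l acc h
    have : l = [] := List.eq_nil_of_length_eq_zero (Nat.le_zero.mp h)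
    subst this
    simp [PySem.Chars.replace.go]
  | succ f ih =>
    intro l acc h
    cases l with
    | nil => simp [PySem.Chars.replace.go]
    | cons d t =>
      rw [PySem.Chars.replace.go]
      by_cases hd : d = c
      · subst hd
        have hp : [d].isPrefixOf (d :: t) = true := by simp [List.isPrefixOf]
        rw [if_pos hp]
        rw [ih _ _ (by simpa using Nat.le_of_succ_le_succ h)]
        simp
      · have hp : [c].isPrefixOf (d :: t) = false := by
          simp [List.isPrefixOf]; exact fun h => absurd h.symm hd
        rw [if_neg (by simp [hp])]
        rw [ih _ _ (by simpa using Nat.le_of_succ_le_succ h)]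
        simp [hd]

lemma pv_replace_single (s : List Char) (c : Char) (new : List Char) :
    PySem.Chars.replace s [c] new = s.flatMap (fun d => if d = c then new else [d]) := by
  rw [PySem.Chars.replace]
  rw [if_neg (by simp)]
  rw [pv_replace_go_single c new s.length s [] le_rfl]
  simp

lemma pv_expand_eq (l : List Char) :
    PySem.Chars.replace (PySem.Chars.replace l ['S'] ['1', '0']) ['L'] ['1', '1', '1', '0']
      = l.flatMap pvCharExp := by
  rw [pv_replace_single, pv_replace_single]
  induction l with
  | nil => rfl
  | cons d t ih =>
    simp only [List.flatMap_cons, List.flatMap_append, ih]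
    congr 1
    by_cases hS : d = 'S'
    · simp [hS, pvCharExp]
    · by_cases hL : d = 'L' <;> simp [hS, hL, pvCharExp]

lemma pv_base_eq (x : String) :
    pvBase x = x.toList.flatMap pvCharExp ++ ['0', '0', '0', '0', '0', '0'] := by
  unfold pvBase
  rw [PySem.Str.toList_replace, PySem.Str.toList_replace]
  have hS : ("S" : String).toList = ['S'] := rfl
  have h10 : ("10" : String).toList = ['1', '0'] := rfl
  have hL : ("L" : String).toList = ['L'] := rfl
  have h1110 : ("1110" : String).toList = ['1', '1', '1', '0'] := rfl
  rw [hS, h10, hL, h1110, pv_expand_eq]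

lemma pv_flat_len (l : List Char) : l.length ≤ (l.flatMap pvCharExp).length := by
  induction l with
  | nil => simp
  | cons d t ih =>
    simp only [List.flatMap_cons, List.length_append, List.length_cons]
    have : 1 ≤ (pvCharExp d).length := by
      unfold pvCharExp; split_ifs <;> simp
    omega

lemma pv_base_len_ge (x : String)
    (hx : 2 ≤ x.toList.length ∨ x.toList = ['S'] ∨ x.toList = ['L']) :
    8 ≤ (pvBase x).length := by
  have h := pv_flat_len x.toList
  rw [pv_base_eq]
  simp only [List.length_append, List.length_cons, List.length_nil]
  rcases hx with h2 | hS | hL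
  · omega
  · rw [hS]; decide
  · rw [hL]; decide

lemma pv_base_pos (x : String) : 1 ≤ (pvBase x).length := by
  rw [pv_base_eq]
  simp only [List.length_append, List.length_cons, List.length_nil]
  omega

-- A-side element: indexing the 450-fold repetition is indexing the base modulo its length
lemma pv_repeat_get {α : Type} (l : List α) : ∀ (n j : Nat), j < n * l.length →
    ((List.replicate n l).flatten)[j]? = l[j % l.length]? := by
  intro n
  induction n with
  | zero => intro j h; exact absurd h (by simp)
  | succ n ih =>
    intro j h
    have hmul : (n + 1) * l.length = n * l.length + l.length := by ring
    rw [List.replicate_succ, List.flatten_cons]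
    by_cases hj : j < l.length
    · rw [List.getElem?_append_left hj, Nat.mod_eq_of_lt hj]
    · rw [not_lt] at hj
      rw [List.getElem?_append_right hj, ih (j - l.length) (by omega)]
      congr 1
      conv_rhs => rw [show j = (j - l.length) + l.length by omega]
      rw [Nat.add_mod_right]

lemma pv_pyGet_pyRepeat (x : String) (j : Nat) (h8 : 8 ≤ (pvBase x).length) (hj : j < 3600) :
    PySem.List.pyGet? (PySem.List.pyRepeat (pvBase x) 450) (j : Int)
      = (pvBase x)[j % (pvBase x).length]? := by
  rw [PySem.List.pyGet?_natCast, PySem.List.pyRepeat]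
  have h450 : (450 : Int).toNat = 450 := rfl
  rw [h450]
  exact pv_repeat_get (pvBase x) 450 j (by
    have : 450 * 8 ≤ 450 * (pvBase x).length := Nat.mul_le_mul_left 450 h8
    omega)

-- B-side: the stride loop length and pointwise effect
lemma pv_stride_length (L : Nat) : ∀ (f i : Nat) (cs : List Nat),
    (pvStride f cs i L).length = cs.length := by
  intro f
  induction f with
  | zero => intro i cs; rfl
  | succ f ih =>
    intro i cs
    simp only [pvStride]
    split
    · rw [ih]; simp
    · rfl

lemma pv_stride_getD (L : Nat) (hL : 1 ≤ L) (j : Nat) :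
    ∀ (f i : Nat) (cs : List Nat), 3600 ≤ f + i → j < cs.length →
    (pvStride f cs i L).getD j 0
      = cs.getD j 0 + (if i ≤ j ∧ j < 3600 ∧ (j - i) % L = 0 then 1 else 0) := by
  intro f
  induction f with
  | zero =>
    intro i cs hf hj
    simp only [pvStride]
    have : ¬ (i ≤ j ∧ j < 3600 ∧ (j - i) % L = 0) := by rintro ⟨h1, h2, _⟩; omega
    rw [if_neg this]; omega
  | succ f ih =>
    intro i cs hf hj
    simp only [pvStride]
    by_cases hi : i < 3600
    · rw [if_pos hi]
      rw [ih (i + L) _ (by omega) (by simpa using hj)]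
      by_cases hji : j = i
      · subst hji
        have hset : ((cs.set j (cs.getD j 0 + 1)).getD j 0) = cs.getD j 0 + 1 := by
          rw [List.getD_eq_getElem?_getD, List.getElem?_set_self hj]; simp
        rw [hset]
        have h1 : ¬ (j + L ≤ j ∧ j < 3600 ∧ (j - (j + L)) % L = 0) := by rintro ⟨h, _⟩; omega
        have h2 : (j ≤ j ∧ j < 3600 ∧ (j - j) % L = 0) := ⟨le_rfl, hi, by simp⟩
        rw [if_neg h1, if_pos h2]
      · have hset : ((cs.set i (cs.getD i 0 + 1)).getD j 0) = cs.getD j 0 := by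
          rw [List.getD_eq_getElem?_getD, List.getElem?_set_ne (fun h => hji h.symm)]; rfl
        rw [hset]
        congr 1
        have hiff : (i + L ≤ j ∧ j < 3600 ∧ (j - (i + L)) % L = 0)
            ↔ (i ≤ j ∧ j < 3600 ∧ (j - i) % L = 0) := by
          constructor
          · rintro ⟨h1, h2, h3⟩
            refine ⟨by omega, h2, ?_⟩
            have he : j - i = (j - (i + L)) + L := by omega
            rw [he, Nat.add_mod_right, h3]
          · rintro ⟨h1, h2, h3⟩
            have hdvd : L ∣ (j - i) := Nat.dvd_of_mod_eq_zero h3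
            have hpos : 0 < j - i := by omega
            have hLle : L ≤ j - i := Nat.le_of_dvd hpos hdvd
            refine ⟨by omega, h2, ?_⟩
            have he : j - (i + L) = (j - i) - L := by omega
            rw [he]
            exact Nat.mod_eq_zero_of_dvd (Nat.dvd_sub hdvd dvd_rfl)
        rw [if_congr hiff rfl rfl]
    · rw [if_neg hi]
      have : ¬ (i ≤ j ∧ j < 3600 ∧ (j - i) % L = 0) := by rintro ⟨h1, h2, _⟩; omega
      rw [if_neg this]; omega

lemma pv_mark_fold_length (base : List Char) (L : Nat) :
    ∀ (l : List Nat) (cs : List Nat),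
    (l.foldl (fun cs r => if base.getD r ' ' = '1' then pvStride 3600 cs r L else cs) cs).length
      = cs.length := by
  intro l
  induction l with
  | nil => intro cs; rfl
  | cons r t ih =>
    intro cs
    rw [List.foldl_cons, ih]
    split
    · rw [pv_stride_length]
    · rfl

lemma pv_mark_fold_getD (base : List Char) (hL : 1 ≤ base.length) (j : Nat) :
    ∀ (n : Nat), n ≤ base.length → ∀ (cs : List Nat), j < cs.length → j < 3600 →
    ((List.range n).foldl
        (fun cs r => if base.getD r ' ' = '1' then pvStride 3600 cs r base.length else cs) cs).getD j 0
      = cs.getD j 0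
        + (if j % base.length < n ∧ base.getD (j % base.length) ' ' = '1' then 1 else 0) := by
  intro n
  induction n with
  | zero =>
    intro _ cs _ _
    simp
  | succ n ih =>
    intro hn cs hj hj3
    rw [List.range_succ, List.foldl_append, List.foldl_cons, List.foldl_nil]
    have hlen := pv_mark_fold_length base base.length (List.range n) cs
    have ihv := ih (by omega) cs hj hj3
    by_cases hlit : base.getD n ' ' = '1'
    · rw [if_pos hlit]
      rw [pv_stride_getD base.length hL j 3600 n _ (by omega) (by omega), ihv]
      by_cases hjn : j % base.length = n
      · have hstride : (n ≤ j ∧ j < 3600 ∧ (j - n) % base.length = 0) := by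
          refine ⟨hjn ▸ Nat.mod_le j base.length, hj3, ?_⟩
          have hdm := Nat.div_add_mod j base.length
          have he : j - n = base.length * (j / base.length) := by omega
          rw [he, Nat.mul_mod_right]
        rw [if_pos hstride]
        have hno : ¬ (j % base.length < n ∧ base.getD (j % base.length) ' ' = '1') := by
          rintro ⟨h, _⟩; omega
        have hyes : (j % base.length < n + 1 ∧ base.getD (j % base.length) ' ' = '1') :=
          ⟨by omega, by rw [hjn]; exact hlit⟩
        rw [if_neg hno, if_pos hyes]
      · have hstride : ¬ (n ≤ j ∧ j < 3600 ∧ (j - n) % base.length = 0) := by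
          rintro ⟨h1, _, h3⟩
          obtain ⟨m, hm⟩ := Nat.dvd_of_mod_eq_zero h3
          have hjeq : j = n + base.length * m := by omega
          have : j % base.length = n := by
            rw [hjeq, Nat.add_mul_mod_self_left, Nat.mod_eq_of_lt (by omega)]
          exact hjn this
        rw [if_neg hstride]
        have hiff : (j % base.length < n ∧ base.getD (j % base.length) ' ' = '1')
            ↔ (j % base.length < n + 1 ∧ base.getD (j % base.length) ' ' = '1') := by
          constructor
          · rintro ⟨h, h'⟩; exact ⟨by omega, h'⟩
          · rintro ⟨h, h'⟩; exact ⟨by omega, h'⟩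
        rw [if_congr hiff rfl rfl]; omega
    · rw [if_neg hlit, ihv]
      congr 1
      by_cases hjn : j % base.length = n
      · have h1 : ¬ (j % base.length < n ∧ base.getD (j % base.length) ' ' = '1') := by
          rintro ⟨h, _⟩; omega
        have h2 : ¬ (j % base.length < n + 1 ∧ base.getD (j % base.length) ' ' = '1') := by
          rintro ⟨_, h⟩; rw [hjn] at h; exact hlit h
        rw [if_neg h1, if_neg h2]
      · have hiff : (j % base.length < n ∧ base.getD (j % base.length) ' ' = '1')
            ↔ (j % base.length < n + 1 ∧ base.getD (j % base.length) ' ' = '1') := by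
          constructor
          · rintro ⟨h, h'⟩; exact ⟨by omega, h'⟩
          · rintro ⟨h, h'⟩; exact ⟨by omega, h'⟩
        rw [if_congr hiff rfl rfl]

lemma pv_mark_length (x : String) (cs : List Nat) : (pvMark cs x).length = cs.length := by
  unfold pvMark
  exact pv_mark_fold_length _ _ _ _

lemma pv_mark_getD (x : String) (cs : List Nat) (j : Nat) (hj : j < cs.length) (hj3 : j < 3600) :
    (pvMark cs x).getD j 0
      = cs.getD j 0 + (if (pvBase x).getD (j % (pvBase x).length) ' ' = '1' then 1 else 0) := by
  unfold pvMark
  rw [pv_mark_fold_getD (pvBase x) (pv_base_pos x) j (pvBase x).length le_rfl cs hj hj3]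
  have hmod : j % (pvBase x).length < (pvBase x).length := Nat.mod_lt j (pv_base_pos x)
  by_cases h : (pvBase x).getD (j % (pvBase x).length) ' ' = '1'
  · rw [if_pos h, if_pos (⟨hmod, h⟩ : _ ∧ _)]
  · rw [if_neg h, if_neg (fun hc : _ ∧ _ => h hc.2)]

lemma pv_counts_length (ls : List String) (cs : List Nat) :
    (ls.foldl pvMark cs).length = cs.length := by
  induction ls generalizing cs with
  | nil => rfl
  | cons x t ih => rw [List.foldl_cons, ih, pv_mark_length]

-- counts equals A's per-time-step column count
set_option maxHeartbeats 1000000 in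
lemma pv_counts_getD (j : Nat) (hj3 : j < 3600) :
    ∀ (ls : List String) (cs : List Nat), (∀ x ∈ ls, 8 ≤ (pvBase x).length) →
    cs.length = 3600 →
    (ls.foldl pvMark cs).getD j 0
      = cs.getD j 0
        + PySem.List.count
            ((ls.map (fun x => PySem.List.pyRepeat (pvBase x) 450)).map
              (fun c => PySem.List.pyGet? c (j : Int)))
            (some '1') := by
  intro ls
  induction ls with
  | nil =>
    intro cs _ _
    simp only [List.foldl_nil, List.map_nil, PySem.List.count_eq, List.count_nil]
    omega
  | cons x t ih =>
    intro cs h8 hlen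
    rw [List.foldl_cons]
    rw [ih (pvMark cs x) (fun y hy => h8 y (List.mem_cons_of_mem x hy))
      (by rw [pv_mark_length]; exact hlen)]
    rw [pv_mark_getD x cs j (by omega) hj3]
    have h8x : 8 ≤ (pvBase x).length := h8 x List.mem_cons_self
    have hget := pv_pyGet_pyRepeat x j h8x hj3
    have hmod : j % (pvBase x).length < (pvBase x).length := Nat.mod_lt j (by omega)
    have hgetD : (pvBase x).getD (j % (pvBase x).length) ' '
        = (pvBase x)[j % (pvBase x).length] := List.getD_eq_getElem _ _ hmod
    have hsome : (pvBase x)[j % (pvBase x).length]? = some (pvBase x)[j % (pvBase x).length] :=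
      List.getElem?_eq_getElem hmod
    simp only [List.map_cons, PySem.List.count_eq]
    rw [hget, hsome]
    by_cases hlit : (pvBase x)[j % (pvBase x).length] = '1'
    · rw [hlit, List.count_cons_self]
      rw [if_pos (by rw [hgetD]; exact hlit)]
      omega
    · rw [List.count_cons_of_ne (fun h => hlit (Option.some.inj h))]
      rw [if_neg (by rw [hgetD]; exact hlit)]
      omega

-- ===== VERDICT (by name: the statement is the Claim_ definition above) =====
set_option maxHeartbeats 1000000 in
theorem calculate_spec : Claim_equal_calculate := by
  intro lighthouses _ hpre
  unfold Spec_calculate calculate calculate_alt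
  have hpat : (((lighthouses.map (fun x => PySem.Str.replace x "S" "10")).map
        (fun x => PySem.Str.replace x "L" "1110")).map
        (fun x => x.toList ++ ['0', '0', '0', '0', '0', '0'])).map
        (fun x => PySem.List.pyRepeat x 450)
      = lighthouses.map (fun x => PySem.List.pyRepeat (pvBase x) 450) := by
    simp only [List.map_map]
    exact List.map_congr_left fun x _ => by simp [pvBase, Function.comp]
  simp only [hpat, List.length_map]
  set counts := lighthouses.foldl pvMark (List.replicate 3600 0) with hcounts
  have hclen : counts.length = 3600 := by
    rw [hcounts, pv_counts_length, List.length_replicate]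
  have hmapself : counts = (List.range 3600).map (fun i => counts.getD i 0) := by
    apply List.ext_getElem
    · simp [hclen]
    · intro i h1 h2
      simp only [List.getElem_map, List.getElem_range]
      rw [List.getD_eq_getElem _ _ (by omega)]
  conv_rhs => rw [hmapself]
  rw [List.foldl_map]
  apply PySem.List.foldl_congr_mem
  intro t i hi
  have hi' : i < 3600 := List.mem_range.mp hi
  have h8 : ∀ x ∈ lighthouses, 8 ≤ (pvBase x).length := fun x hx =>
    pv_base_len_ge x (hpre x hx)
  have hc := pv_counts_getD i hi' lighthouses (List.replicate 3600 0) h8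
    (by rw [List.length_replicate])
  have hz : (List.replicate 3600 (0 : Nat)).getD i 0 = 0 := by
    rw [List.getD_eq_getElem?_getD, List.getElem?_replicate, if_pos hi', Option.getD_some]
  rw [hz, Nat.zero_add] at hc
  rw [← hcounts] at hc
  simp only [hc]
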